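-- pv_equiv track=rewrite | github.com/Alintermans/Thesis | Experiments/ConstrainedParodieGenerator/SongUtils.py | get_song_structure
-- ===== SOURCE A (Python) =====
-- def get_song_structure(song_in_paragraphs):
--     new_song_in_paragraphs = []
--     structure = []
--     for i in range(len(song_in_paragraphs)):
--         paragraph = song_in_paragraphs[i]
--         if paragraph not in new_song_in_paragraphs:
--             new_song_in_paragraphs.append(paragraph)
--             structure.append(len(new_song_in_paragraphs)-1)
--         else:
--             structure.append(new_song_in_paragraphs.index(paragraph))
--
--     return new_song_in_paragraphs, structure
-- ===== SOURCE B (Python) =====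
-- def get_song_structure(song_in_paragraphs):
--     n = len(song_in_paragraphs)
--     new_song_in_paragraphs = []
--     structure = [None] * n
--     for i in range(n):
--         if structure[i] is None:
--             paragraph = song_in_paragraphs[i]
--             k = len(new_song_in_paragraphs)
--             new_song_in_paragraphs.append(paragraph)
--             for j in range(i, n):
--                 if song_in_paragraphs[j] == paragraph:
--                     structure[j] = k
--     return new_song_in_paragraphs, structure
-- ===== Notes on version B (the rewrite author's own statement) =====
-- stated objective: alternative
-- what changed: Inverts A's per-element gather (membership test + .index scan against the growing dedup list) into a scatter: structure is preallocated, and each position whose slot is still empty registers a new paragraph and writes its rank forward into every later matching position; no lookup against new_song ever happens.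
import Mathlib
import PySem

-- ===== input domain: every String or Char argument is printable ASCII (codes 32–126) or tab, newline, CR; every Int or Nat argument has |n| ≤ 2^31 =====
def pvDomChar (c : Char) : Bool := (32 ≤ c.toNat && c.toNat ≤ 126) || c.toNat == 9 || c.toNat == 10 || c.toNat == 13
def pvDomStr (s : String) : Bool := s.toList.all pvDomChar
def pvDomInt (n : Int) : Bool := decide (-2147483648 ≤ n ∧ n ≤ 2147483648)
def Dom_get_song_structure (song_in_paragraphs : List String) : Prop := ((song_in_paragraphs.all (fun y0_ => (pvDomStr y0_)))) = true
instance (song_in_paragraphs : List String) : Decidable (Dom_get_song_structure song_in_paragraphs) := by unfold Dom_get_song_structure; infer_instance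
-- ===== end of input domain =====

-- B inverts A's gather (membership + .index lookups) into a forward scatter over a
-- preallocated structure array; a genuinely different traversal of the same cost.

-- ===== PORT A =====
-- the loop body: acc = (new_song_in_paragraphs, structure), p = song_in_paragraphs[i]
def pvStepA (acc : List String × List Int) (p : String) : List String × List Int :=
  if p ∉ acc.1 then
    (acc.1 ++ [p], acc.2 ++ [((acc.1 ++ [p]).length : Int) - 1])
  else
    -- .index cannot raise here since p ∈ acc.1; getD 0 is never taken
    (acc.1, acc.2 ++ [(((PySem.List.index? acc.1 p).getD 0 : Nat) : Int)])

def get_song_structure (song_in_paragraphs : List String) : List String × List Int :=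
  (PySem.List.pyRange 0 (song_in_paragraphs.length : Int) 1).foldl
    (fun acc i => pvStepA acc (PySem.List.pyGetD song_in_paragraphs i ""))
    ([], [])

-- ===== PORT B =====
-- inner loop: for j in range(i, n): if song[j] == paragraph: structure[j] = k
def pvScatterB (song : List String) (p : String) (k : Int) (i : Int)
    (st : List (Option Int)) : List (Option Int) :=
  (PySem.List.pyRange i (song.length : Int) 1).foldl
    (fun st j => if PySem.List.pyGetD song j "" = p then PySem.List.pySetD st j (some k) else st)
    st

-- outer loop body: acc = (new_song_in_paragraphs, structure), i the loop index
def pvStepB (song : List String) (acc : List String × List (Option Int)) (i : Int) :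
    List String × List (Option Int) :=
  match PySem.List.pyGetD acc.2 i none with
  | none =>
    let p := PySem.List.pyGetD song i ""
    let k := (acc.1.length : Int)
    (acc.1 ++ [p], pvScatterB song p k i acc.2)
  | some _ => acc

def get_song_structure_alt (song_in_paragraphs : List String) : List String × List Int :=
  let res := (PySem.List.pyRange 0 (song_in_paragraphs.length : Int) 1).foldl
    (pvStepB song_in_paragraphs)
    ([], List.replicate song_in_paragraphs.length none)
  -- every slot is filled when the loop ends; getD 0 is never taken
  (res.1, res.2.map (fun o => o.getD 0))

-- ===== PRECONDITION & SPEC =====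
def Spec_get_song_structure (song_in_paragraphs : List String) (out : List String × List Int) : Prop := out = get_song_structure_alt song_in_paragraphs
instance (song_in_paragraphs : List String) (out : List String × List Int) : Decidable (Spec_get_song_structure song_in_paragraphs out) := by unfold Spec_get_song_structure; infer_instance

-- ===== CLAIM (what is proved, stated in full; the proofs are below) =====
def Claim_equal_get_song_structure : Prop := ∀ (song_in_paragraphs : List String), Dom_get_song_structure song_in_paragraphs → Spec_get_song_structure song_in_paragraphs (get_song_structure song_in_paragraphs)

-- ===== LEMMAS AND PROOFS =====

-- canonical form both ports are reduced to
def pvIdxI (xs : List String) (q : String) : Int :=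
  (((PySem.List.index? (PySem.List.dedup xs) q).getD 0 : Nat) : Int)

def pvCanon (xs : List String) : List String × List Int :=
  (PySem.List.dedup xs, xs.map (pvIdxI xs))

theorem pvA_foldl (xs : List String) :
    get_song_structure xs = xs.foldl pvStepA ([], []) := by
  unfold get_song_structure
  have := PySem.List.foldl_pyRange_pyGetD' xs "" pvStepA ([], []) (a := 0) le_rfl
  simpa using this

theorem pvDedup_concat (xs : List String) (p : String) :
    PySem.List.dedup (xs ++ [p]) =
      if p ∈ PySem.List.dedup xs then PySem.List.dedup xs else PySem.List.dedup xs ++ [p] := by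
  have hmem : p ∈ PySem.List.dedup xs ↔ p ∈ (xs.foldl PySem.Set.add []) := by
    rw [PySem.List.dedup_eq_ofList, PySem.Set.ofList_eq_foldl]
  simp only [PySem.List.dedup_eq_ofList, PySem.Set.ofList_eq_foldl, List.foldl_append,
    List.foldl_cons, List.foldl_nil]
  by_cases h : p ∈ (xs.foldl PySem.Set.add []) <;>
    simp [PySem.Set.add, PySem.Set.contains, h]

theorem pvA_canon (xs : List String) : get_song_structure xs = pvCanon xs := by
  rw [pvA_foldl]
  induction xs using List.reverseRecOn with
  | nil => simp [pvCanon, PySem.List.dedup]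
  | append_singleton xs p ih =>
    rw [List.foldl_append, List.foldl_cons, List.foldl_nil, ih]
    unfold pvCanon pvStepA
    rw [pvDedup_concat]
    by_cases h : p ∈ PySem.List.dedup xs
    · rw [if_pos h, if_neg (not_not_intro h)]
      have hf : pvIdxI (xs ++ [p]) = pvIdxI xs := by
        funext q; unfold pvIdxI; rw [pvDedup_concat, if_pos h]
      refine Prod.ext rfl ?_
      simp only [List.map_append, List.map_cons, List.map_nil, hf, pvIdxI]
    · rw [if_neg h, if_pos h]
      have hdd : PySem.List.dedup (xs ++ [p]) = PySem.List.dedup xs ++ [p] := by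
        rw [pvDedup_concat, if_neg h]
      refine Prod.ext rfl ?_
      have hmap : xs.map (pvIdxI (xs ++ [p])) = xs.map (pvIdxI xs) := by
        apply List.map_congr_left
        intro q hq
        unfold pvIdxI
        rw [hdd, PySem.List.index?_append_of_mem [p] (by simpa [PySem.List.mem_dedup] using hq)]
      have hp : pvIdxI (xs ++ [p]) p = ((PySem.List.dedup xs).length : Int) := by
        unfold pvIdxI
        rw [hdd, PySem.List.index?_append_singleton_self _ p h]
        simp
      simp only [List.map_append, List.map_cons, List.map_nil, hmap, hp]
      simp [List.length_append]

theorem pvFoldl_add_prefix (ys : List String) :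
    ∀ (l : List String), ∃ zs, ys.foldl PySem.Set.add l = l ++ zs := by
  induction ys with
  | nil => exact fun l => ⟨[], by simp⟩
  | cons y ys ih =>
    intro l
    obtain ⟨zs, hz⟩ := ih (PySem.Set.add l y)
    by_cases h : y ∈ l
    · exact ⟨zs, by simpa [PySem.Set.add, PySem.Set.contains, h] using hz⟩
    · refine ⟨y :: zs, ?_⟩
      simpa [PySem.Set.add, PySem.Set.contains, h] using hz

theorem pvDedup_take_prefix (xs : List String) (m : Nat) :
    ∃ zs, PySem.List.dedup xs = PySem.List.dedup (xs.take m) ++ zs := by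
  have hx : xs = xs.take m ++ xs.drop m := (List.take_append_drop m xs).symm
  obtain ⟨zs, hz⟩ := pvFoldl_add_prefix (xs.drop m) (PySem.List.dedup (xs.take m))
  refine ⟨zs, ?_⟩
  conv_lhs => rw [hx]
  rw [PySem.List.dedup_eq_ofList, PySem.Set.ofList_eq_foldl, List.foldl_append]
  rw [PySem.List.dedup_eq_ofList, PySem.Set.ofList_eq_foldl] at hz ⊢
  exact hz

-- first occurrence: the index of xs[m] in the full dedup is the number of distinct
-- paragraphs seen strictly before position m
theorem pvIdx_first (xs : List String) (m : Nat) (hm : m < xs.length)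
    (hnot : xs[m] ∉ xs.take m) :
    PySem.List.index? (PySem.List.dedup xs) xs[m] =
      some (PySem.List.dedup (xs.take m)).length := by
  have hmemdd : xs[m] ∉ PySem.List.dedup (xs.take m) := by
    simpa [PySem.List.mem_dedup] using hnot
  have htake : xs.take (m+1) = xs.take m ++ [xs[m]] := by
    rw [List.take_add_one]; simp [List.getElem?_eq_getElem hm]
  have hd1 : PySem.List.dedup (xs.take (m+1)) =
      PySem.List.dedup (xs.take m) ++ [xs[m]] := by
    rw [htake, pvDedup_concat, if_neg hmemdd]
  obtain ⟨zs, hz⟩ := pvDedup_take_prefix xs (m+1)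
  rw [hz, hd1, PySem.List.index?_append_of_mem zs (by simp),
    PySem.List.index?_append_singleton_self _ _ hmemdd]

-- the inner scatter loop, characterised pointwise
theorem pvScatter_get (xs : List String) (p : String) (k : Int) :
    ∀ (d : Nat) (i : Int) (st : List (Option Int)), 0 ≤ i → (xs.length : Int) = i + d →
      st.length = xs.length → ∀ (j : Nat),
      (pvScatterB xs p k i st)[j]? =
        if i ≤ (j : Int) ∧ j < xs.length ∧ xs[j]?.getD "" = p then some (some k)
        else st[j]? := by
  intro d
  induction d with
  | zero =>
    intro i st hi hlen hst j
    unfold pvScatterB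
    rw [PySem.List.pyRange_one_eq_nil (by omega)]
    simp only [List.foldl_nil]
    rw [if_neg (by omega)]
  | succ d ih =>
    intro i st hi hlen hst j
    have hilt : i < (xs.length : Int) := by omega
    unfold pvScatterB
    rw [PySem.List.pyRange_one_cons (by omega), List.foldl_cons]
    rw [show ((PySem.List.pyRange (i+1) (xs.length : Int) 1).foldl
        (fun (st : List (Option Int)) j =>
          if PySem.List.pyGetD xs j "" = p then PySem.List.pySetD st j (some k) else st)
        (if PySem.List.pyGetD xs i "" = p then PySem.List.pySetD st i (some k) else st))
        = pvScatterB xs p k (i+1)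
            (if PySem.List.pyGetD xs i "" = p then PySem.List.pySetD st i (some k) else st)
      from rfl]
    have hst1 : (if PySem.List.pyGetD xs i "" = p then PySem.List.pySetD st i (some k)
        else st).length = xs.length := by
      split <;> simp [PySem.List.length_pySetD, hst]
    rw [ih (i+1) _ (by omega) (by omega) hst1 j]
    have hget : PySem.List.pyGetD xs i "" = xs[i.toNat] :=
      PySem.List.pyGetD_eq_getElem xs "" hi (by exact_mod_cast hilt)
    by_cases hji : (j : Int) = i
    · have hjlt : j < xs.length := by omega
      have hti : i.toNat = j := by omega
      have hget2 : PySem.List.pyGetD xs i "" = xs[j] := by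
        rw [hget]; simp only [hti]
      have hgj : xs[j]?.getD "" = xs[j] := by
        rw [List.getElem?_eq_getElem hjlt]; rfl
      rw [if_neg (by omega)]
      by_cases hp : xs[j] = p
      · have hcnd : i ≤ (j : Int) ∧ j < xs.length ∧ xs[j]?.getD "" = p := by
          refine ⟨by omega, hjlt, ?_⟩
          rw [hgj]; exact hp
        rw [if_pos hcnd, if_pos (by rw [hget2]; exact hp)]
        rw [PySem.List.pySetD_of_nonneg st (some k) hi]
        simp [hti, hjlt, hst]
      · have hne : ¬(i ≤ (j : Int) ∧ j < xs.length ∧ xs[j]?.getD "" = p) := by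
          rintro ⟨-, -, hc⟩
          rw [hgj] at hc
          exact hp hc
        rw [if_neg hne]
        rw [if_neg (by rw [hget2]; exact hp)]
    · have hcond : ((i : Int) + 1 ≤ (j : Int) ∧ j < xs.length ∧ xs[j]?.getD "" = p)
          ↔ (i ≤ (j : Int) ∧ j < xs.length ∧ xs[j]?.getD "" = p) := by
        constructor
        · rintro ⟨h1, h2, h3⟩; exact ⟨by omega, h2, h3⟩
        · rintro ⟨h1, h2, h3⟩; exact ⟨by omega, h2, h3⟩
      rw [show (if (i : Int) + 1 ≤ (j : Int) ∧ j < xs.length ∧ xs[j]?.getD "" = p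
            then some (some k) else _) = _ from if_congr hcond rfl rfl]
      split
      · rfl
      · split
        · rw [PySem.List.pySetD_of_nonneg st (some k) hi]
          rw [List.getElem?_set]
          rw [if_neg (by omega)]
        · rfl

-- the state of B's structure array after the first m outer iterations
def pvStInv (xs : List String) (m : Nat) : List (Option Int) :=
  xs.map (fun q => if q ∈ xs.take m then some (pvIdxI xs q) else none)

theorem pvB_loop (xs : List String) : ∀ (m : Nat), m ≤ xs.length →
    (PySem.List.pyRange 0 (m : Int) 1).foldl (pvStepB xs)
        ([], List.replicate xs.length none)
      = (PySem.List.dedup (xs.take m), pvStInv xs m) := by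
  intro m
  induction m with
  | zero =>
    intro _
    rw [PySem.List.pyRange_one_eq_nil (by omega)]
    simp [pvStInv, PySem.List.dedup, List.map_const']
  | succ m ih =>
    intro hm1
    have hm : m < xs.length := by omega
    have hcast : ((m + 1 : Nat) : Int) = (m : Int) + 1 := by push_cast; ring
    rw [hcast, PySem.List.pyRange_one_succ_right (by omega), List.foldl_append,
      List.foldl_cons, List.foldl_nil, ih (by omega)]
    have htake : xs.take (m+1) = xs.take m ++ [xs[m]] := by
      rw [List.take_add_one]; simp [List.getElem?_eq_getElem hm]
    have hread : PySem.List.pyGetD (pvStInv xs m) (m : Int) none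
        = if xs[m] ∈ xs.take m then some (pvIdxI xs xs[m]) else none := by
      rw [PySem.List.pyGetD_natCast]
      unfold pvStInv
      rw [List.getD_eq_getElem?_getD, List.getElem?_map, List.getElem?_eq_getElem hm]
      rfl
    by_cases hseen : xs[m] ∈ xs.take m
    · -- slot already filled: the step does nothing
      have : pvStepB xs (PySem.List.dedup (xs.take m), pvStInv xs m) (m : Int)
          = (PySem.List.dedup (xs.take m), pvStInv xs m) := by
        unfold pvStepB
        rw [hread, if_pos hseen]
      rw [this]
      have hdd : PySem.List.dedup (xs.take (m+1)) = PySem.List.dedup (xs.take m) := by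
        rw [htake, pvDedup_concat, if_pos (by simpa [PySem.List.mem_dedup] using hseen)]
      have hst : pvStInv xs (m+1) = pvStInv xs m := by
        unfold pvStInv
        apply List.map_congr_left
        intro q _
        have : q ∈ xs.take (m+1) ↔ q ∈ xs.take m := by
          rw [htake]
          simp only [List.mem_append, List.mem_singleton]
          constructor
          · rintro (h | rfl); exacts [h, hseen]
          · exact fun h => Or.inl h
        split_ifs with h1 h2 h2 <;> first
          | rfl
          | exact absurd (this.mp h1) h2
          | exact absurd (this.mpr h2) h1
      rw [hdd, hst]
    · -- first occurrence: register xs[m] and scatter its rank forward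
      have hstep : pvStepB xs (PySem.List.dedup (xs.take m), pvStInv xs m) (m : Int)
          = (PySem.List.dedup (xs.take m) ++ [PySem.List.pyGetD xs (m : Int) ""],
             pvScatterB xs (PySem.List.pyGetD xs (m : Int) "")
               ((PySem.List.dedup (xs.take m)).length : Int) (m : Int) (pvStInv xs m)) := by
        unfold pvStepB
        rw [hread, if_neg hseen]
      have hget : PySem.List.pyGetD xs (m : Int) "" = xs[m] := by
        rw [PySem.List.pyGetD_natCast, List.getD_eq_getElem?_getD,
          List.getElem?_eq_getElem hm]; rfl
      rw [hstep, hget]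
      have hdd : PySem.List.dedup (xs.take (m+1)) =
          PySem.List.dedup (xs.take m) ++ [xs[m]] := by
        rw [htake, pvDedup_concat, if_neg (by simpa [PySem.List.mem_dedup] using hseen)]
      refine Prod.ext (by rw [hdd]) ?_
      have hidx : pvIdxI xs xs[m] = ((PySem.List.dedup (xs.take m)).length : Int) := by
        unfold pvIdxI
        rw [pvIdx_first xs m hm hseen]
        rfl
      apply List.ext_getElem?
      intro j
      rw [pvScatter_get xs xs[m] _ (xs.length - m) (m : Int) (pvStInv xs m)
        (by omega) (by omega) (by simp [pvStInv]) j]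
      by_cases hjn : j < xs.length
      · have hRHS : (pvStInv xs (m+1))[j]? =
            some (if xs[j] ∈ xs.take (m+1) then some (pvIdxI xs xs[j]) else none) := by
          unfold pvStInv
          rw [List.getElem?_map, List.getElem?_eq_getElem hjn]; rfl
        have hLHS : (pvStInv xs m)[j]? =
            some (if xs[j] ∈ xs.take m then some (pvIdxI xs xs[j]) else none) := by
          unfold pvStInv
          rw [List.getElem?_map, List.getElem?_eq_getElem hjn]; rfl
        have hgj : xs[j]?.getD "" = xs[j] := by
          rw [List.getElem?_eq_getElem hjn]; rfl
        rw [hRHS, hgj]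
        by_cases hc : (m : Int) ≤ (j : Int) ∧ j < xs.length ∧ xs[j] = xs[m]
        · obtain ⟨hc1, hc2, hc3⟩ := hc
          rw [if_pos ⟨hc1, hc2, hc3⟩]
          have hmem1 : xs[j] ∈ xs.take (m+1) := by
            rw [hc3, htake]; exact List.mem_append_right _ (List.mem_singleton_self _)
          rw [if_pos hmem1]
          rw [hc3, hidx]
        · rw [if_neg hc, hLHS]
          by_cases hmem : xs[j] ∈ xs.take m
          · have hmem1 : xs[j] ∈ xs.take (m+1) := by
              rw [htake]; exact List.mem_append_left _ hmem
            rw [if_pos hmem, if_pos hmem1]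
          · have hnm : xs[j] ∉ xs.take (m+1) := by
              rw [htake]
              simp only [List.mem_append, List.mem_singleton]
              rintro (h | h)
              · exact hmem h
              · -- xs[j] = xs[m] but the scatter condition failed, so j < m, whence xs[j] ∈ take m
                have hjm : j < m := by
                  by_contra hge
                  exact hc ⟨by omega, hjn, h⟩
                apply hmem
                have hx : (xs.take m)[j]'(by simp; omega) = xs[j] := List.getElem_take
                rw [← hx]
                exact List.getElem_mem _
            rw [if_neg hmem, if_neg hnm]
      · have h1 : (pvStInv xs (m+1))[j]? = none :=
          List.getElem?_eq_none (by simp [pvStInv]; omega)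
        have h2 : (pvStInv xs m)[j]? = none :=
          List.getElem?_eq_none (by simp [pvStInv]; omega)
        rw [if_neg (by rintro ⟨-, h, -⟩; omega)]
        show (pvStInv xs m)[j]? = (pvStInv xs (m+1))[j]?
        rw [h1, h2]

theorem pvB_canon (xs : List String) : get_song_structure_alt xs = pvCanon xs := by
  unfold get_song_structure_alt
  rw [pvB_loop xs xs.length le_rfl]
  unfold pvCanon
  refine Prod.ext (by simp) ?_
  simp only [pvStInv, List.take_length, List.map_map]
  apply List.map_congr_left
  intro q hq
  simp [hq]

-- ===== VERDICT (by name: the statement is the Claim_ definition above) =====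
theorem get_song_structure_spec : Claim_equal_get_song_structure := by
  intro xs _
  unfold Spec_get_song_structure
  rw [pvA_canon, pvB_canon]
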